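-- pv_equiv track=rewrite | github.com/lacithelaci/oktatas | deik_verseny/lnko.py | lnko
-- ===== SOURCE A (Python) =====
-- from math import gcd
--
-- def lnko(a, b):
--     max_lnko = 1
--     min_osszeg = float('inf')
--     eredmeny = None
--
--     for i in range(a, b):
--         for j in range(i + 1, b + 1):
--             if gcd(i, j) > max_lnko:
--                 max_lnko = gcd(i, j)
--                 eredmeny = (i, j)
--                 min_osszeg = i + j
--             elif gcd(i, j) == max_lnko and i + j < min_osszeg:
--                 eredmeny = (i, j)
--                 min_osszeg = i + j
--
--     return eredmeny
-- ===== SOURCE B (Python) =====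
-- def lnko(a, b):
--     # largest d with two multiples in [a, b]; answer = the two smallest
--     # multiples of d (consecutive multiples k*d, (k+1)*d, k = ceil(a/d)).
--     if b <= a:
--         return None
--     d0 = max(-a, b) if a <= 0 <= b else b - a
--     for d in range(d0, 0, -1):
--         k = -((-a) // d)          # ceil(a / d)
--         if (k + 1) * d <= b:
--             return (k * d, (k + 1) * d)
-- ===== Notes on version B (the rewrite author's own statement) =====
-- stated objective: alternative
-- what changed: A brute-forces all O(n^2) pairs in [a,b] tracking max gcd and min sum; B instead searches d downward from a closed-form bound for the largest d having two multiples in the range and returns d's two smallest (consecutive) multiples, which is exactly the max-gcd min-sum pair.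
import Mathlib
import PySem

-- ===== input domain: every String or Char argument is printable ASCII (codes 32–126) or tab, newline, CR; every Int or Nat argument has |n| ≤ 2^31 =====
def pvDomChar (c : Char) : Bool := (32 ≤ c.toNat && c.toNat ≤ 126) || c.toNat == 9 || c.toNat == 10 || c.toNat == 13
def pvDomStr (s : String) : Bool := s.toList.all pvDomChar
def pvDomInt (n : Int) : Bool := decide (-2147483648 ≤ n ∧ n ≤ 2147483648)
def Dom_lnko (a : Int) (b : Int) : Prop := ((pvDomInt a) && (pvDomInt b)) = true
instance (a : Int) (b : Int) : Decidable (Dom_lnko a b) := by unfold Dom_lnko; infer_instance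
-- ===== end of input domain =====

-- B replaces A's brute force over all pairs by a descending search for the largest d
-- having two multiples in [a,b] (the answer is then d's two smallest multiples).


-- ===== PORT A =====
-- 'i + j < min_osszeg' where min_osszeg starts as float('inf'): the only float is the
-- sentinel inf, represented exactly as `none : Option Int` (any int is < inf).
def pvLtInf (x : Int) : Option Int → Bool
  | none => true
  | some m => x < m

def lnko (a : Int) (b : Int) : Option (List Int) :=
  let s := (PySem.List.pyRange a b 1).foldl (fun s i =>
    (PySem.List.pyRange (i + 1) (b + 1) 1).foldl (fun s j =>
      if s.1 < (Int.gcd i j : Int) then ((Int.gcd i j : Int), some (i + j), some (i, j))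
      else if (Int.gcd i j : Int) = s.1 ∧ pvLtInf (i + j) s.2.1 = true then
        (s.1, some (i + j), some (i, j))
      else s) s)
    ((1 : Int), (none : Option Int), (none : Option (Int × Int)))
  s.2.2.map (fun p => [p.1, p.2])

-- ===== PORT B =====
def lnko_alt (a : Int) (b : Int) : Option (List Int) :=
  if b ≤ a then none
  else
    let d0 : Int := if a ≤ 0 ∧ 0 ≤ b then max (-a) b else b - a
    (PySem.List.pyRange d0 0 (-1)).findSome? (fun d =>
      let k := -(PySem.Int.floordiv (-a) d)   -- ceil(a / d)
      if (k + 1) * d ≤ b then some [k * d, (k + 1) * d] else none)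

-- ===== PRECONDITION & SPEC =====
def Spec_lnko (a : Int) (b : Int) (out : Option (List Int)) : Prop := out = lnko_alt a b
instance (a : Int) (b : Int) (out : Option (List Int)) : Decidable (Spec_lnko a b out) := by unfold Spec_lnko; infer_instance

-- ===== CLAIM (what is proved, stated in full; the proofs are below) =====
def Claim_equal_lnko : Prop := ∀ (a : Int) (b : Int), Dom_lnko a b → Spec_lnko a b (lnko a b)

-- ===== LEMMAS AND PROOFS =====

-- (i, j) is a pair A's loops visit
def pvPair (a b : Int) (p : Int × Int) : Prop := a ≤ p.1 ∧ p.1 < p.2 ∧ p.2 ≤ b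

-- p is strictly preferred to q by A's update rule (larger gcd, else equal gcd and smaller sum)
def pvBetter (p q : Int × Int) : Prop :=
  (Int.gcd q.1 q.2 : Int) < (Int.gcd p.1 p.2 : Int) ∨
  ((Int.gcd p.1 p.2 : Int) = (Int.gcd q.1 q.2 : Int) ∧ p.1 + p.2 < q.1 + q.2)

theorem pv_ceil_bounds (a d : Int) (hd : 0 < d) :
    (-(PySem.Int.floordiv (-a) d) - 1) * d < a ∧ a ≤ -(PySem.Int.floordiv (-a) d) * d :=
  (PySem.Int.neg_floordiv_neg_eq_iff_of_pos (a := a) (b := d)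
    (q := -(PySem.Int.floordiv (-a) d)) hd).mp rfl

theorem pv_gcd_consec (k : Int) : Int.gcd k (k + 1) = 1 := by
  have h1 : (↑(Int.gcd k (k+1)) : Int) ∣ k := Int.gcd_dvd_left k (k+1)
  have h2 : (↑(Int.gcd k (k+1)) : Int) ∣ (k+1) := Int.gcd_dvd_right k (k+1)
  have h3 : (↑(Int.gcd k (k+1)) : Int) ∣ 1 := by
    have h4 := dvd_sub h2 h1
    have h5 : k + 1 - k = 1 := by ring
    rwa [h5] at h4
  exact Nat.dvd_one.mp (by exact_mod_cast h3)

theorem pv_gcd_pair (k d : Int) (hd : 0 < d) : (Int.gcd (k * d) ((k + 1) * d) : Int) = d := by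
  rw [Int.gcd_mul_right, pv_gcd_consec]
  simp [Int.natAbs_of_nonneg (le_of_lt hd)]

-- gcd of any visited pair is ≥ 1 and ≤ the start bound d0
theorem pv_gcd_ge_one (p : Int × Int) (h : p.1 < p.2) : 1 ≤ (Int.gcd p.1 p.2 : Int) := by
  have hne : Int.gcd p.1 p.2 ≠ 0 := by
    intro h0
    rcases Int.gcd_eq_zero_iff.mp h0 with ⟨h1, h2⟩
    omega
  exact_mod_cast Nat.one_le_iff_ne_zero.mpr hne

theorem pv_gcd_le_d0 (a b : Int) (p : Int × Int) (hp : pvPair a b p) :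
    (Int.gcd p.1 p.2 : Int) ≤ (if a ≤ 0 ∧ 0 ≤ b then max (-a) b else b - a) := by
  obtain ⟨hi, hij, hj⟩ := hp
  have hgi : (Int.gcd p.1 p.2 : Int) ∣ p.1 := Int.gcd_dvd_left p.1 p.2
  have hgj : (Int.gcd p.1 p.2 : Int) ∣ p.2 := Int.gcd_dvd_right p.1 p.2
  split_ifs with h0
  · -- 0 may lie in [a,b]: bound by the nonzero endpoint it divides
    have hx : ∃ x : Int, (Int.gcd p.1 p.2 : Int) ∣ x ∧ x ≠ 0 ∧ a ≤ x ∧ x ≤ b := by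
      by_cases hiz : p.1 = 0
      · exact ⟨p.2, hgj, by omega, by omega, hj⟩
      · exact ⟨p.1, hgi, hiz, hi, by omega⟩
    obtain ⟨x, hdvd, hxz, hxa, hxb⟩ := hx
    have h1 : (Int.gcd p.1 p.2 : Int) ≤ |x| :=
      Int.le_of_dvd (abs_pos.mpr hxz) ((dvd_abs _ _).mpr hdvd)
    have h2 := le_max_left (-a) b
    have h3 := le_max_right (-a) b
    rcases abs_cases x with ⟨he, _⟩ | ⟨he, _⟩ <;> omega
  · have hdvd : (Int.gcd p.1 p.2 : Int) ∣ p.2 - p.1 := dvd_sub hgj hgi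
    have h1 : (Int.gcd p.1 p.2 : Int) ≤ p.2 - p.1 := Int.le_of_dvd (by omega) hdvd
    omega

-- d (≥1) has two multiples in [a,b] iff its two smallest multiples fit
theorem pv_cond_of_dvd (a b d : Int) (hd : 0 < d) (p : Int × Int) (hp : pvPair a b p)
    (h1 : d ∣ p.1) (h2 : d ∣ p.2) :
    (-(PySem.Int.floordiv (-a) d) + 1) * d ≤ b := by
  obtain ⟨hi, hij, hj⟩ := hp
  obtain ⟨hcl, hcu⟩ := pv_ceil_bounds a d hd
  obtain ⟨m, hm⟩ := h1
  obtain ⟨n, hn⟩ := h2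
  have hkm : -(PySem.Int.floordiv (-a) d) - 1 < m :=
    lt_of_mul_lt_mul_right (by nlinarith [hcl, hi, hm]) (le_of_lt hd)
  have hmn : m < n := lt_of_mul_lt_mul_right (by nlinarith [hij, hm, hn]) (le_of_lt hd)
  have h4 : (-(PySem.Int.floordiv (-a) d) + 1) * d ≤ n * d :=
    mul_le_mul_of_nonneg_right (by omega) (le_of_lt hd)
  nlinarith [h4, hn, hj]

-- the pair B returns for the first successful d is strictly better than every other pair
theorem pv_opt (a b d k : Int) (hd : 0 < d) (hk : k = -(PySem.Int.floordiv (-a) d))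
    (hc : (k + 1) * d ≤ b)
    (hmax : ∀ q : Int × Int, pvPair a b q → (Int.gcd q.1 q.2 : Int) ≤ d) :
    pvPair a b (k * d, (k + 1) * d) ∧
    ∀ q : Int × Int, pvPair a b q → q ≠ (k * d, (k + 1) * d) → pvBetter (k * d, (k + 1) * d) q := by
  obtain ⟨hcl, hcu⟩ := pv_ceil_bounds a d hd
  rw [← hk] at hcl hcu
  have hpp : pvPair a b (k * d, (k + 1) * d) := ⟨hcu, by nlinarith, hc⟩
  refine ⟨hpp, ?_⟩
  rintro ⟨q1, q2⟩ hq hne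
  have hgp : (Int.gcd (k * d) ((k + 1) * d) : Int) = d := pv_gcd_pair k d hd
  rcases lt_or_eq_of_le (hmax (q1, q2) hq) with hlt | heq
  · exact Or.inl (by simpa [hgp] using hlt)
  · -- equal gcds: q is a pair of multiples of d; compare sums
    have hd1 : d ∣ q1 := heq ▸ Int.gcd_dvd_left q1 q2
    have hd2 : d ∣ q2 := heq ▸ Int.gcd_dvd_right q1 q2
    obtain ⟨hi, hij, hj⟩ := hq
    obtain ⟨m, hm⟩ := hd1
    obtain ⟨n, hn⟩ := hd2
    have hkm : k - 1 < m := lt_of_mul_lt_mul_right (by nlinarith) (le_of_lt hd)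
    have hmn : m < n := lt_of_mul_lt_mul_right (by nlinarith) (le_of_lt hd)
    have hne' : ¬ (m = k ∧ n = k + 1) := by
      rintro ⟨rfl, rfl⟩
      exact hne (by simp [hm, hn, mul_comm])
    have hsum : 2 * k + 2 ≤ m + n := by omega
    have : (2 * k + 2) * d ≤ (m + n) * d := mul_le_mul_of_nonneg_right hsum (le_of_lt hd)
    refine Or.inr ⟨by rw [hgp, heq], by nlinarith⟩

theorem pv_floordiv_one (x : Int) : PySem.Int.floordiv x 1 = x := by
  rw [PySem.Int.floordiv_eq_ediv_of_pos (by norm_num)]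
  exact Int.ediv_one x

-- descending search: the first d whose two smallest multiples fit is found, and it
-- still bounds the gcd of every pair
theorem pv_find (a b : Int) (hab : a < b) : ∀ (n : Nat) (c : Int), c.toNat = n → 1 ≤ c →
    (∀ q : Int × Int, pvPair a b q → (Int.gcd q.1 q.2 : Int) ≤ c) →
    ∃ d k : Int, 1 ≤ d ∧ k = -(PySem.Int.floordiv (-a) d) ∧ (k + 1) * d ≤ b ∧
      (∀ q : Int × Int, pvPair a b q → (Int.gcd q.1 q.2 : Int) ≤ d) ∧
      (PySem.List.pyRange c 0 (-1)).findSome? (fun d =>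
        let k := -(PySem.Int.floordiv (-a) d)
        if (k + 1) * d ≤ b then some [k * d, (k + 1) * d] else none) = some [k * d, (k + 1) * d] := by
  intro n
  induction n using Nat.strong_induction_on with
  | _ n ih =>
    intro c hcn hc1 hmax
    rw [PySem.List.pyRange_neg_one_cons (by omega : (0:Int) < c), List.findSome?_cons]
    by_cases hcond : (-(PySem.Int.floordiv (-a) c) + 1) * c ≤ b
    · refine ⟨c, -(PySem.Int.floordiv (-a) c), hc1, rfl, hcond, hmax, ?_⟩
      simp only [if_pos hcond]
    · -- this c has no two multiples in range; no pair has gcd = c, recurse on c-1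
      have hc2 : 2 ≤ c := by
        rcases lt_or_eq_of_le hc1 with h | h
        · omega
        · exfalso
          apply hcond
          rw [← h, pv_floordiv_one]
          omega
      have hmax' : ∀ q : Int × Int, pvPair a b q → (Int.gcd q.1 q.2 : Int) ≤ c - 1 := by
        intro q hq
        rcases lt_or_eq_of_le (hmax q hq) with h | h
        · omega
        · exfalso
          exact hcond (pv_cond_of_dvd a b c (by omega) q hq
            (h ▸ Int.gcd_dvd_left q.1 q.2) (h ▸ Int.gcd_dvd_right q.1 q.2))
      obtain ⟨d, k, h1, h2, h3, h4, h5⟩ :=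
        ih (c - 1).toNat (by omega) (c - 1) rfl (by omega) hmax'
      refine ⟨d, k, h1, h2, h3, h4, ?_⟩
      simp only [if_neg hcond]
      simpa using h5

-- B-side: the countdown findSome? returns the optimal pair
theorem pv_B (a b : Int) (hab : a < b) :
    ∃ p : Int × Int, lnko_alt a b = some [p.1, p.2] ∧ pvPair a b p ∧
      ∀ q : Int × Int, pvPair a b q → q ≠ p → pvBetter p q := by
  have hd0 : 1 ≤ (if a ≤ 0 ∧ 0 ≤ b then max (-a) b else b - a) := by
    have h2 := le_max_left (-a) b
    have h3 := le_max_right (-a) b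
    split_ifs with h <;> omega
  obtain ⟨d, k, h1, h2, h3, h4, h5⟩ :=
    pv_find a b hab (if a ≤ 0 ∧ 0 ≤ b then max (-a) b else b - a).toNat
      (if a ≤ 0 ∧ 0 ≤ b then max (-a) b else b - a) rfl hd0
      (fun q hq => pv_gcd_le_d0 a b q hq)
  obtain ⟨hpp, hopt⟩ := pv_opt a b d k (by omega) h2 h3 h4
  refine ⟨(k * d, (k + 1) * d), ?_, hpp, hopt⟩
  unfold lnko_alt
  rw [if_neg (by omega)]
  exact h5

-- A's loop body as a step function on the state (max_lnko, min_osszeg, eredmeny)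
def pvStep (s : Int × Option Int × Option (Int × Int)) (p : Int × Int) :
    Int × Option Int × Option (Int × Int) :=
  if s.1 < (Int.gcd p.1 p.2 : Int) then ((Int.gcd p.1 p.2 : Int), some (p.1 + p.2), some p)
  else if (Int.gcd p.1 p.2 : Int) = s.1 ∧ pvLtInf (p.1 + p.2) s.2.1 = true then
    (s.1, some (p.1 + p.2), some p)
  else s

theorem pv_foldl_flatMap {α β γ : Type} (g : α → List β) (f : γ → β → γ) :
    ∀ (l : List α) (init : γ),
      (l.flatMap g).foldl f init = l.foldl (fun s x => (g x).foldl f s) init := by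
  intro l
  induction l with
  | nil => intro init; rfl
  | cons x t ih => intro init; rw [List.flatMap_cons, List.foldl_append, List.foldl_cons, ih]

def pvPairs (a b : Int) : List (Int × Int) :=
  (PySem.List.pyRange a b 1).flatMap (fun i =>
    (PySem.List.pyRange (i + 1) (b + 1) 1).map (fun j => (i, j)))

theorem pv_lnko_eq (a b : Int) :
    lnko a b = (((pvPairs a b).foldl pvStep
      ((1 : Int), (none : Option Int), (none : Option (Int × Int)))).2.2).map
        (fun p => [p.1, p.2]) := by
  unfold lnko pvPairs
  rw [pv_foldl_flatMap]
  simp only [List.foldl_map]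
  rfl

theorem pv_mem_pairs (a b : Int) (p : Int × Int) : p ∈ pvPairs a b ↔ pvPair a b p := by
  unfold pvPairs pvPair
  simp only [List.mem_flatMap, List.mem_map, PySem.List.mem_pyRange_one]
  constructor
  · rintro ⟨i, ⟨hi1, hi2⟩, j, ⟨hj1, hj2⟩, rfl⟩
    exact ⟨hi1, by omega, by omega⟩
  · rintro ⟨h1, h2, h3⟩
    exact ⟨p.1, ⟨h1, by omega⟩, p.2, ⟨by omega, by omega⟩, rfl⟩

theorem pv_fold_inv (l : List (Int × Int)) (hl : ∀ p ∈ l, p.1 < p.2) :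
    (l = [] ∧ l.foldl pvStep ((1 : Int), none, none) = (1, none, none)) ∨
    ∃ p ∈ l, l.foldl pvStep ((1 : Int), none, none) =
        ((Int.gcd p.1 p.2 : Int), some (p.1 + p.2), some p) ∧
      ∀ q ∈ l, ¬ pvBetter q p := by
  induction l using List.reverseRecOn with
  | nil => exact Or.inl ⟨rfl, rfl⟩
  | append_singleton t x ih =>
    have hlt : ∀ p ∈ t, p.1 < p.2 := fun p hp => hl p (List.mem_append_left _ hp)
    have hx : x.1 < x.2 := hl x (by simp)
    rw [List.foldl_append, List.foldl_cons, List.foldl_nil]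
    rcases ih hlt with ⟨rfl, hs⟩ | ⟨p, hpmem, hs, hbest⟩
    · -- first pair scanned: it is always recorded
      rw [hs]
      refine Or.inr ⟨x, by simp, ?_, ?_⟩
      · have hg1 : 1 ≤ (Int.gcd x.1 x.2 : Int) := pv_gcd_ge_one x hx
        unfold pvStep
        rcases lt_or_eq_of_le hg1 with h | h
        · rw [if_pos h]
        · rw [if_neg (by omega), if_pos (by simp [pvLtInf, ← h])]
          rw [← h]
      · intro q hq
        simp at hq
        subst hq
        unfold pvBetter
        omega
    · rw [hs]
      unfold pvStep
      by_cases h1 : (Int.gcd p.1 p.2 : Int) < (Int.gcd x.1 x.2 : Int)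
      · rw [if_pos h1]
        refine Or.inr ⟨x, by simp, rfl, ?_⟩
        intro q hq hbq
        rcases List.mem_append.mp hq with hq | hq
        · have := hbest q hq
          unfold pvBetter at hbq this
          omega
        · simp at hq; subst hq; unfold pvBetter at hbq; omega
      · by_cases h2 : (Int.gcd x.1 x.2 : Int) = (Int.gcd p.1 p.2 : Int) ∧ x.1 + x.2 < p.1 + p.2
        · rw [if_neg h1, if_pos (by simpa [pvLtInf] using h2)]
          refine Or.inr ⟨x, by simp, by rw [h2.1], ?_⟩
          intro q hq hbq
          rcases List.mem_append.mp hq with hq | hq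
          · have := hbest q hq
            unfold pvBetter at hbq this
            omega
          · simp at hq; subst hq; unfold pvBetter at hbq; omega
        · rw [if_neg h1, if_neg (by simpa [pvLtInf] using h2)]
          refine Or.inr ⟨p, List.mem_append_left _ hpmem, rfl, ?_⟩
          intro q hq hbq
          rcases List.mem_append.mp hq with hq | hq
          · exact hbest q hq hbq
          · simp at hq; subst hq
            unfold pvBetter at hbq
            rcases hbq with hb | hb
            · exact h1 hb
            · exact h2 hb

-- A-side: the nested fold returns some pair no visited pair strictly beats
theorem pv_A (a b : Int) (hab : a < b) :
    ∃ p : Int × Int, lnko a b = some [p.1, p.2] ∧ pvPair a b p ∧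
      ∀ q : Int × Int, pvPair a b q → ¬ pvBetter q p := by
  have hl : ∀ p ∈ pvPairs a b, p.1 < p.2 := fun p hp => ((pv_mem_pairs a b p).mp hp).2.1
  rcases pv_fold_inv (pvPairs a b) hl with ⟨hnil, _⟩ | ⟨p, hpmem, hs, hbest⟩
  · exfalso
    have : (a, a + 1) ∈ pvPairs a b := (pv_mem_pairs a b (a, a + 1)).mpr ⟨le_refl a, by omega, by omega⟩
    rw [hnil] at this
    simp at this
  · refine ⟨p, ?_, (pv_mem_pairs a b p).mp hpmem, ?_⟩
    · rw [pv_lnko_eq, hs]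
      rfl
    · intro q hq
      exact hbest q ((pv_mem_pairs a b q).mpr hq)

-- ===== VERDICT (by name: the statement is the Claim_ definition above) =====
theorem lnko_spec : Claim_equal_lnko := by
  intro a b _
  unfold Spec_lnko
  rcases le_or_gt b a with hba | hab
  · have hA : lnko a b = none := by
      unfold lnko
      rw [PySem.List.pyRange_one_eq_nil hba]
      rfl
    have hB : lnko_alt a b = none := by
      unfold lnko_alt
      rw [if_pos hba]
    rw [hA, hB]
  · obtain ⟨p, hpA, hpP, hpBest⟩ := pv_A a b hab
    obtain ⟨q, hqB, hqP, hqOpt⟩ := pv_B a b hab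
    have : p = q := by
      by_contra hne
      exact hpBest q hqP (hqOpt p hpP (fun h => hne h))
    rw [hpA, hqB, this]
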